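-- pv_equiv track=rewrite | github.com/dengsauve/dailyprogramming | Anagram Maker [#280]/suave_libs.py | is_word_in_unordered_target
-- ===== SOURCE A (Python) =====
-- def is_word_in_unordered_target(sub_string, super_string):
--     x, y = list(sub_string), list(super_string)
--     for i in x:
--         try:
--             y.remove(i)
--         except ValueError:
--             return False
--     return True
-- ===== SOURCE B (Python) =====
-- def is_word_in_unordered_target(sub_string, super_string):
--     sub = sorted(sub_string)
--     sup = sorted(super_string)
--     j = 0
--     for c in sub:
--         while j < len(sup) and sup[j] < c:
--             j += 1
--         if j == len(sup) or sup[j] != c: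
--             return False
--         j += 1
--     return True
-- ===== Notes on version B (the rewrite author's own statement) =====
-- stated objective: faster
-- what changed: Instead of removing each sub character from a copy of the target list (a rescans per character), B sorts both strings once and verifies multiset containment with a single two-pointer merge walk over the two sorted sequences.
import Mathlib
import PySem

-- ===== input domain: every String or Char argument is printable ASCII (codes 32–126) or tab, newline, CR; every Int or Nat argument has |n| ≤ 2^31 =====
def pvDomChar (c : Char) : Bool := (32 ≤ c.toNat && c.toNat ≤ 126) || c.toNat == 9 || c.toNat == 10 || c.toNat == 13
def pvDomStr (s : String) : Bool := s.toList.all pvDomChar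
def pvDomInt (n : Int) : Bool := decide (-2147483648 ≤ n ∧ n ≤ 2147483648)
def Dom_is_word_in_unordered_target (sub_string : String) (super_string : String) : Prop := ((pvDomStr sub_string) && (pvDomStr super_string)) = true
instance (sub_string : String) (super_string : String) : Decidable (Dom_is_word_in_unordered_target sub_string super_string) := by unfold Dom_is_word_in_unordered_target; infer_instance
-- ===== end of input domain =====

-- B replaces A's per-character list.remove rescans by sorting both strings once and
-- checking containment with a single two-pointer merge walk (objective: alternative algorithm).

-- ===== PORT A =====
-- 'for i in x: try y.remove(i) except ValueError: return False'
def pvRemoveLoop (x : List Char) (y : List Char) : Bool :=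
  match x with
  | [] => true
  | i :: rest =>
    match PySem.List.remove? y i with
    | none => false
    | some y' => pvRemoveLoop rest y'

def is_word_in_unordered_target (sub_string : String) (super_string : String) : Bool :=
  pvRemoveLoop sub_string.toList super_string.toList

-- ===== PORT B =====
-- Source B's main loop over the sorted sub; the inner 'while sup[j] < c: j += 1' is the
-- first branch (it drops one element of the remaining sup and retries the same c).
def pvMergeLoop : List Char → List Char → Bool
  | [], _ => true
  | _ :: _, [] => false
  | c :: cs, d :: ds =>
      if d < c then pvMergeLoop (c :: cs) ds        -- advance j past smaller elements
      else if d = c then pvMergeLoop cs ds          -- matched: consume both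
      else false                                    -- sup[j] > c: c cannot occur any more
  termination_by a b => (a.length, b.length)

def is_word_in_unordered_target_alt (sub_string : String) (super_string : String) : Bool :=
  -- sub = sorted(sub_string); sup = sorted(super_string)
  pvMergeLoop (PySem.List.sorted sub_string.toList (fun c => c) false)
              (PySem.List.sorted super_string.toList (fun c => c) false)

-- ===== PRECONDITION & SPEC =====
def Spec_is_word_in_unordered_target (sub_string : String) (super_string : String) (out : Bool) : Prop := out = is_word_in_unordered_target_alt sub_string super_string
instance (sub_string : String) (super_string : String) (out : Bool) : Decidable (Spec_is_word_in_unordered_target sub_string super_string out) := by unfold Spec_is_word_in_unordered_target; infer_instance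

-- ===== CLAIM (what is proved, stated in full; the proofs are below) =====
def Claim_equal_is_word_in_unordered_target : Prop := ∀ (sub_string : String) (super_string : String), Dom_is_word_in_unordered_target sub_string super_string → Spec_is_word_in_unordered_target sub_string super_string (is_word_in_unordered_target sub_string super_string)

-- ===== LEMMAS AND PROOFS =====

-- A's loop succeeds iff sub's multiset is contained in sup's multiset.
theorem pvRemoveLoop_eq_true_iff (x : List Char) : ∀ (y : List Char),
    pvRemoveLoop x y = true ↔ ∀ c, x.count c ≤ y.count c := by
  induction x with
  | nil => intro y; simp [pvRemoveLoop]
  | cons i rest ih =>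
    intro y
    simp only [pvRemoveLoop]
    by_cases hmem : i ∈ y
    · rw [PySem.List.remove?_eq_some_erase y i hmem, ih]
      have hic : 0 < y.count i := List.count_pos_iff.2 hmem
      constructor
      · intro h c
        have hc := h c
        by_cases hci : c = i
        · subst hci
          rw [List.count_erase_self] at hc
          simp only [List.count_cons_self]
          omega
        · rw [List.count_erase_of_ne hci] at hc
          have hic2 : ¬ i = c := fun h => hci h.symm
          simp only [List.count_cons, beq_iff_eq, if_neg hic2]
          omega
      · intro h c
        have hc := h c
        by_cases hci : c = i
        · subst hci
          rw [List.count_erase_self]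
          simp only [List.count_cons_self] at hc
          omega
        · rw [List.count_erase_of_ne hci]
          have hic2 : ¬ i = c := fun h => hci h.symm
          simp only [List.count_cons, beq_iff_eq, if_neg hic2] at hc
          omega
    · rw [(PySem.List.remove?_eq_none_iff y i).2 hmem]
      have h0 : y.count i = 0 := List.count_eq_zero.2 hmem
      constructor
      · intro h; cases h
      · intro h
        have := h i
        simp [List.count_cons_self, h0] at this

-- The merge walk on two ≤-sorted lists decides the sublist relation.
theorem pvMergeLoop_eq_true_iff : ∀ (a b : List Char),
    a.Pairwise (· ≤ ·) → b.Pairwise (· ≤ ·) →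
    (pvMergeLoop a b = true ↔ List.Sublist a b)
  | [], b, _, _ => by simp [pvMergeLoop]
  | c :: cs, [], _, _ => by simp [pvMergeLoop]
  | c :: cs, d :: ds, ha, hb => by
    have hb' : ds.Pairwise (· ≤ ·) := hb.tail
    simp only [pvMergeLoop]
    by_cases hdc : d < c
    · rw [if_pos hdc, pvMergeLoop_eq_true_iff (c :: cs) ds ha hb']
      rw [List.sublist_cons_iff]
      constructor
      · exact Or.inl
      · rintro (h | ⟨r, hr, _⟩)
        · exact h
        · exact absurd (List.cons.injEq .. ▸ hr).1 (by intro h; subst h; exact lt_irrefl c hdc)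
    · rw [if_neg hdc]
      by_cases hde : d = c
      · subst hde
        rw [if_pos rfl, pvMergeLoop_eq_true_iff cs ds ha.tail hb']
        exact List.cons_sublist_cons.symm
      · rw [if_neg hde]
        constructor
        · intro h; cases h
        · intro h
          exfalso
          have hcmem := h.subset (List.mem_cons_self ..)
          rcases List.mem_cons.1 hcmem with h' | hcds
          · exact hde h'.symm
          · have hle : d ≤ c := List.rel_of_pairwise_cons hb hcds
            rcases lt_or_eq_of_le hle with h' | h'
            · exact hdc h'
            · exact hde h'
  termination_by a b => (a.length, b.length)

-- The sorted-sublist test is the multiset-containment test.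
theorem sorted_sublist_iff_count (x y : List Char) :
    List.Sublist (PySem.List.sorted x (fun c => c) false) (PySem.List.sorted y (fun c => c) false) ↔
    ∀ c, x.count c ≤ y.count c := by
  have px : (PySem.List.sorted x (fun c => c) false).Perm x := PySem.List.sorted_perm ..
  have py : (PySem.List.sorted y (fun c => c) false).Perm y := PySem.List.sorted_perm ..
  constructor
  · intro h c
    have := h.count_le c
    rwa [px.count_eq, py.count_eq] at this
  · intro h
    apply List.sublist_of_subperm_of_pairwise _ (PySem.List.sorted_pairwise ..) (PySem.List.sorted_pairwise ..)
    rw [List.subperm_ext_iff]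
    intro c _
    rw [px.count_eq, py.count_eq]
    exact h c

-- ===== VERDICT (by name: the statement is the Claim_ definition above) =====
theorem is_word_in_unordered_target_spec : Claim_equal_is_word_in_unordered_target := by
  intro sub sup _
  unfold Spec_is_word_in_unordered_target is_word_in_unordered_target is_word_in_unordered_target_alt
  rw [Bool.eq_iff_iff, pvRemoveLoop_eq_true_iff,
      pvMergeLoop_eq_true_iff _ _ (PySem.List.sorted_pairwise ..) (PySem.List.sorted_pairwise ..),
      sorted_sublist_iff_count]
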